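-- pv_equiv track=rewrite | github.com/dawngerpony/algorithms | python/katas/solving_a_puzzle_by_matching_four_corners_final.py | puzzle_solver
-- ===== SOURCE A (Python) =====
-- def puzzle_solver(pieces, width, height):
--     l_dict = {}
--     t_dict = {}
--     q = [ [None for i in range(width)] for j in range(height) ]
--     for p in pieces:
--         p = Piece(p)
--         # top left corner
--         if p.tl is None and p.tr is None and p.bl is None:
--             q[0][0] = p
--             continue
--         lkey = (p.tl, p.bl)
--         if lkey not in l_dict: l_dict[lkey] = []
--         l_dict[lkey].append(p)
--         tkey = (p.tl, p.tr)
--         if tkey not in t_dict: t_dict[tkey] = []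
--         t_dict[tkey].append(p)
--     # top row, working from left to right
--     for x in range(1, width):
--         q[0][x] = l_dict[(q[0][x-1].tr, q[0][x-1].br)].pop()
--     # the rest of the rows, looking at the piece above
--     for y in range(1, height):
--         for x in range(0, width):
--             q[y][x] = t_dict[(q[y-1][x].bl, q[y-1][x].br)].pop()
--
--     # pull out the IDs and create the required list/tuple structure
--     return [tuple([w.id for w in q[h]]) for h in range(height)]
--
-- class Piece:
--     def __init__(self, data):
--         up, down, self.id = data
--         self.tl, self.tr = up
--         self.bl, self.br = down
-- ===== SOURCE B (Python) =====
-- def puzzle_solver(pieces, width, height):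
--     corner = None
--     rest = []
--     for p in pieces:
--         if p[0][0] is None and p[0][1] is None and p[1][0] is None:
--             corner = p
--         else:
--             rest.append(p)
--     l_dict = {}
--     t_dict = {}
--     for p in rest:
--         l_dict.setdefault((p[0][0], p[1][0]), []).append(p)
--         t_dict.setdefault((p[0][0], p[0][1]), []).append(p)
--     # one row-major pass; A instead fills the top row first (l_dict) and then
--     # everything below it (t_dict): here t_dict serves only the leftmost column
--     # and l_dict serves every other cell
--     grid = []
--     for y in range(height):
--         row = []
--         for x in range(width):
--             if x > 0:
--                 prev = row[-1]
--                 p = l_dict[(prev[0][1], prev[1][1])].pop()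
--             elif y > 0:
--                 above = grid[-1][0]
--                 p = t_dict[(above[1][0], above[1][1])].pop()
--             else:
--                 p = corner
--             row.append(p)
--         grid.append(row)
--     return [tuple(p[2] for p in row) for row in grid]
-- ===== Notes on version B (the rewrite author's own statement) =====
-- stated objective: alternative
-- what changed: B drops the Piece class and A's three fill phases (top row via l_dict, then every lower cell via t_dict) and instead builds the grid in one row-major y/x loop with the dict roles transposed: t_dict serves only the leftmost cell of each row and l_dict every other cell, so empty grids fall out of the loop bounds naturally.
import Mathlib
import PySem

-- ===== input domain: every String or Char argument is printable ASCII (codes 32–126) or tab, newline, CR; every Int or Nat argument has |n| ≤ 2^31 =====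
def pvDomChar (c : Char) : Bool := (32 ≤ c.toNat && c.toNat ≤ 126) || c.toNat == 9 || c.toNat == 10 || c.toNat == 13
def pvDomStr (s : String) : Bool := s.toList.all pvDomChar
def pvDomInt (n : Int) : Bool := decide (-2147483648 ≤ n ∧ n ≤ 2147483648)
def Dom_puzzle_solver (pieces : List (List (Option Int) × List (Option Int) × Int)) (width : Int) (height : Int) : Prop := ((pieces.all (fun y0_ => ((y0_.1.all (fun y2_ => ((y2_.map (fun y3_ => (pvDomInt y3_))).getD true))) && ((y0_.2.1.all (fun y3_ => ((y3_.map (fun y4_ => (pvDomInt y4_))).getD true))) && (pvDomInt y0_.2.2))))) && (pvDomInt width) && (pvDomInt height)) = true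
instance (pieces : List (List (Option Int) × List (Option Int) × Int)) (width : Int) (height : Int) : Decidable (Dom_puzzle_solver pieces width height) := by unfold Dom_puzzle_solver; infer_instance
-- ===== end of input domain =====

-- B keeps the two edge-key dicts but assembles the grid in one row-major pass with the dict
-- roles transposed (the top-matching dict serves only the leftmost column, the left-matching
-- dict every other cell) on plain tuples instead of a Piece class; objective: alternative
-- decomposition, same cost.  Equality is claimed on the inputs in Pre_ below.

-- ===== PORT A =====
-- piece = (up, down, id); accessors pattern-match 'self.tl, self.tr = up' (length ≠ 2 raises in Python, outside Pre_)
abbrev PvP : Type := List (Option Int) × List (Option Int) × Int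
abbrev PvK : Type := Option Int × Option Int
abbrev PvD : Type := PySem.Dict PvK (List PvP)

def pvDummy : PvP := ([], [], 0)
def pvTL (p : PvP) : Option Int := match p.1 with | [a, _] => a | _ => none
def pvTR (p : PvP) : Option Int := match p.1 with | [_, b] => b | _ => none
def pvBL (p : PvP) : Option Int := match p.2.1 with | [a, _] => a | _ => none
def pvBR (p : PvP) : Option Int := match p.2.1 with | [_, b] => b | _ => none
def pvCorner (p : PvP) : Bool := pvTL p == none && pvTR p == none && pvBL p == none

-- the body of A's first loop: catch the corner piece, index every other piece in both dicts
def aStep (st : Option PvP × PvD × PvD) (p : PvP) : Option PvP × PvD × PvD :=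
  if pvCorner p then (some p, st.2.1, st.2.2)
  else
    let lk : PvK := (pvTL p, pvBL p)
    let ld0 := if st.2.1.contains lk then st.2.1 else st.2.1.insert lk []
    let ld := ld0.insert lk (ld0.getD lk [] ++ [p])
    let tk : PvK := (pvTL p, pvTR p)
    let td0 := if st.2.2.contains tk then st.2.2 else st.2.2.insert tk []
    let td := td0.insert tk (td0.getD tk [] ++ [p])
    (st.1, ld, td)

-- d[k].pop(): missing key (KeyError) or empty bucket (IndexError) raise in Python, outside Pre_
def aPop (d : PvD) (k : PvK) : Option PvP × PvD :=
  match d.get? k with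
  | some b => (b.getLast?, d.insert k b.dropLast)
  | none => (none, d)

-- 'for x in range(1, width)': each new cell looks at the cell just placed to its left
def aFillRight : Nat → PvP → PvD → List PvP × PvD
  | 0, _, d => ([], d)
  | Nat.succ n, prev, d =>
    let r := aPop d (pvTR prev, pvBR prev)
    let p := r.1.getD pvDummy
    let rest := aFillRight n p r.2
    (p :: rest.1, rest.2)

-- inner loop 'for x in range(0, width)': each cell of a row looks at the cell above it
def aFillBelow : List PvP → PvD → List PvP × PvD
  | [], d => ([], d)
  | a :: above, d =>
    let r := aPop d (pvBL a, pvBR a)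
    let p := r.1.getD pvDummy
    let rest := aFillBelow above r.2
    (p :: rest.1, rest.2)

-- 'for y in range(1, height)'
def aFillRows : Nat → List PvP → PvD → List (List PvP)
  | 0, _, _ => []
  | Nat.succ n, above, d =>
    let r := aFillBelow above d
    r.1 :: aFillRows n r.1 r.2

-- height ≤ 0: q = [] and the comprehension yields []; width ≤ 0 (height ≥ 1): the rows of q
-- are never written and come out as empty tuples — same emptiness as Python's ranges
def puzzle_solver (pieces : List (List (Option Int) × List (Option Int) × Int)) (width : Int) (height : Int) : List (List Int) :=
  let st := pieces.foldl aStep (none, PySem.Dict.empty, PySem.Dict.empty)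
  let corner := st.1.getD pvDummy   -- q[0][0] left as None raises later in Python, outside Pre_
  if height.toNat = 0 then []
  else if width.toNat = 0 then (List.range height.toNat).map (fun _ => [])
  else
    let row0 := corner :: (aFillRight (width.toNat - 1) corner st.2.1).1
    let rows := row0 :: aFillRows (height.toNat - 1) row0 st.2.2
    rows.map (fun r => r.map (fun p => p.2.2))

-- ===== PORT B =====
-- Source B indexes tuples: p[0][0] etc.; IndexError on short lists is outside Pre_
def bFst (l : List (Option Int)) : Option Int := match l with | a :: _ => a | [] => none
def bSnd (l : List (Option Int)) : Option Int := match l with | _ :: b :: _ => b | _ => none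
def bTL (p : PvP) : Option Int := bFst p.1
def bTR (p : PvP) : Option Int := bSnd p.1
def bBL (p : PvP) : Option Int := bFst p.2.1
def bBR (p : PvP) : Option Int := bSnd p.2.1
def bCorner (p : PvP) : Bool := bTL p == none && bTR p == none && bBL p == none

-- Source B's first loop: keep the (last) corner, collect the remaining pieces in order
def bSplitStep (st : Option PvP × List PvP) (p : PvP) : Option PvP × List PvP :=
  if bCorner p then (some p, st.2) else (st.1, st.2 ++ [p])

-- Source B's second loop: setdefault-and-append into both dicts
def bDictStep (st : PvD × PvD) (p : PvP) : PvD × PvD :=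
  let lk : PvK := (bTL p, bBL p)
  let ld0 := st.1.setdefault lk []
  let ld := ld0.insert lk (ld0.getD lk [] ++ [p])
  let tk : PvK := (bTL p, bTR p)
  let td0 := st.2.setdefault tk []
  let td := td0.insert tk (td0.getD tk [] ++ [p])
  (ld, td)

def bPop (d : PvD) (k : PvK) : Option PvP × PvD :=
  match d.get? k with
  | some b => (b.getLast?, d.insert k b.dropLast)
  | none => (none, d)

-- the x > 0 cells of one row: each keyed on the right edge of the cell just placed
def bRowTail : Nat → PvP → PvD → List PvP × PvD
  | 0, _, d => ([], d)
  | Nat.succ n, prev, d =>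
    let r := bPop d (bTR prev, bBR prev)
    let p := r.1.getD pvDummy
    let rest := bRowTail n p r.2
    (p :: rest.1, rest.2)

-- 'for y in range(height)': first cell of a row is the corner (y = 0) or a t_dict pop keyed
-- on the bottom edge of grid[-1][0]; the rest of the row comes from l_dict (bRowTail)
def bGridGo : Nat → Option (List PvP) → PvP → Nat → PvD → PvD → List (List PvP)
  | 0, _, _, _, _, _ => []
  | Nat.succ k, prev, corner, w, ld, td =>
    match w with
    | 0 => [] :: bGridGo k (some []) corner 0 ld td
    | Nat.succ n =>
      let lt : PvP × PvD :=
        match prev with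
        | none => (corner, td)
        | some pr =>
          let a := pr.headD pvDummy
          let r := bPop td (bBL a, bBR a)
          (r.1.getD pvDummy, r.2)
      let t := bRowTail n lt.1 ld
      (lt.1 :: t.1) :: bGridGo k (some (lt.1 :: t.1)) corner (Nat.succ n) t.2 lt.2

def puzzle_solver_alt (pieces : List (List (Option Int) × List (Option Int) × Int)) (width : Int) (height : Int) : List (List Int) :=
  let s := pieces.foldl bSplitStep (none, [])
  let corner := s.1.getD pvDummy   -- corner = None raises later in Python, outside Pre_
  let dd := s.2.foldl bDictStep (PySem.Dict.empty, PySem.Dict.empty)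
  let grid := bGridGo height.toNat none corner width.toNat dd.1 dd.2
  grid.map (fun r => r.map (fun p => p.2.2))

-- ===== PRECONDITION & SPEC =====
def pvLK (p : PvP) : PvK := (pvTL p, pvBL p)
def pvTK (p : PvP) : PvK := (pvTL p, pvTR p)
def pvRK (p : PvP) : PvK := (pvTR p, pvBR p)
def pvBK (p : PvP) : PvK := (pvBL p, pvBR p)

-- some ordering of the pieces tiles the width×height grid row-major: the top-left corner
-- piece first, every other cell non-corner, horizontally adjacent cells match on the left
-- key, vertically on the top key, and every key actually looked up (left key of a cell with
-- x ≥ 1, top key of a cell with y ≥ 1) identifies exactly one piece of the whole input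
def pvGood (σ : List PvP) (W H : Nat) : Prop :=
  pvCorner (σ.getD 0 pvDummy) = true ∧
  (∀ i ∈ List.range (W * H), i ≠ 0 → pvCorner (σ.getD i pvDummy) = false) ∧
  σ.Nodup ∧
  (∀ y ∈ List.range H, ∀ x ∈ List.range (W - 1), pvLK (σ.getD (y * W + x + 1) pvDummy) = pvRK (σ.getD (y * W + x) pvDummy)) ∧
  (∀ y ∈ List.range (H - 1), ∀ x ∈ List.range W, pvTK (σ.getD ((y + 1) * W + x) pvDummy) = pvBK (σ.getD (y * W + x) pvDummy)) ∧
  (∀ y ∈ List.range H, ∀ x ∈ List.range (W - 1), σ.countP (fun q => !pvCorner q && (pvLK q == pvLK (σ.getD (y * W + x + 1) pvDummy))) = 1) ∧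
  (∀ y ∈ List.range (H - 1), ∀ x ∈ List.range W, σ.countP (fun q => !pvCorner q && (pvTK q == pvTK (σ.getD ((y + 1) * W + x) pvDummy))) = 1)

-- Pre_ admits: puzzles that are a well-formed unambiguous exact tiling of the grid; the empty
-- grids (height ≤ 0 with width ≤ 1, or width ≤ 0) without a corner piece, where A returns a
-- grid of empty rows; and 1×1 grids with a corner piece.  It excludes inputs where A raises
-- (missing/empty dict key, malformed piece, no corner piece, leftover corner assignment) and,
-- although A may still return there, piece sets that do not tile the grid unambiguously
-- (duplicated edge keys, piece count ≠ width·height): there the grid A returns depends on its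
-- pop order and B's value (or exception) is as defensible.
def Pre_puzzle_solver (pieces : List (List (Option Int) × List (Option Int) × Int)) (width : Int) (height : Int) : Prop :=
  (∀ p ∈ pieces, p.1.length = 2 ∧ p.2.1.length = 2) ∧
  ((1 ≤ width ∧ 1 ≤ height ∧
      pieces.length = width.toNat * height.toNat ∧
      ∃ σ ∈ pieces.permutations, pvGood σ width.toNat height.toNat) ∨
   (((height ≤ 0 ∧ width ≤ 1) ∨ (width ≤ 0 ∧ 1 ≤ height)) ∧ ∀ p ∈ pieces, pvCorner p = false) ∨
   (width = 1 ∧ height = 1 ∧ ∃ p ∈ pieces, pvCorner p = true))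

instance (pieces : List (List (Option Int) × List (Option Int) × Int)) (width : Int) (height : Int) : Decidable (Pre_puzzle_solver pieces width height) := by
  unfold Pre_puzzle_solver pvGood; infer_instance

def pvWitness_puzzle_solver : (List (List (Option Int) × List (Option Int) × Int)) × Int × Int :=
  ([([none, none], [none, some 1], 100), ([none, none], [some 1, some 2], 101),
    ([none, some 1], [none, some 3], 102), ([some 1, some 2], [some 3, some 4], 103)], 2, 2)

def Spec_puzzle_solver (pieces : List (List (Option Int) × List (Option Int) × Int)) (width : Int) (height : Int) (out : List (List Int)) : Prop := out = puzzle_solver_alt pieces width height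
instance (pieces : List (List (Option Int) × List (Option Int) × Int)) (width : Int) (height : Int) (out : List (List Int)) : Decidable (Spec_puzzle_solver pieces width height out) := by unfold Spec_puzzle_solver; infer_instance

-- ===== CLAIM (what is proved, stated in full; the proofs are below) =====
def Claim_equal_puzzle_solver : Prop := ∀ (pieces : List (List (Option Int) × List (Option Int) × Int)) (width : Int) (height : Int), Dom_puzzle_solver pieces width height → Pre_puzzle_solver pieces width height → Spec_puzzle_solver pieces width height (puzzle_solver pieces width height)

-- ===== LEMMAS AND PROOFS =====

-- well-formed piece: both edge lists have length 2
theorem pvLen2 (p : PvP) (h1 : p.1.length = 2) (h2 : p.2.1.length = 2) :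
    ∃ a b c d i, p = ([a, b], [c, d], i) := by
  obtain ⟨u, dn, i⟩ := p
  match u, h1, dn, h2 with
  | [a, b], _, [c, d], _ => exact ⟨a, b, c, d, i, rfl⟩

-- on well-formed pieces B's index accessors agree with A's unpacking accessors
theorem pvAcc (p : PvP) (h1 : p.1.length = 2) (h2 : p.2.1.length = 2) :
    bTL p = pvTL p ∧ bTR p = pvTR p ∧ bBL p = pvBL p ∧ bBR p = pvBR p ∧ bCorner p = pvCorner p := by
  obtain ⟨a, b, c, d, i, rfl⟩ := pvLen2 p h1 h2
  exact ⟨rfl, rfl, rfl, rfl, rfl⟩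

theorem pvFilterSingleton {α : Type} (l : List α) (pred : α → Bool) (p : α)
    (hc : l.countP pred = 1) (hmem : p ∈ l) (hp : pred p = true) : l.filter pred = [p] := by
  rw [List.countP_eq_length_filter] at hc
  obtain ⟨u, hu⟩ := List.length_eq_one_iff.1 hc
  have hpf : p ∈ l.filter pred := List.mem_filter.2 ⟨hmem, hp⟩
  rw [hu] at hpf
  simp only [List.mem_singleton] at hpf
  rw [hu, hpf]

theorem pvFilterSingletonU {α : Type} (l : List α) (pred : α → Bool) (p : α)
    (hnd : l.Nodup) (hmem : p ∈ l) (hp : pred p = true)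
    (huniq : ∀ q ∈ l, pred q = true → q = p) : l.filter pred = [p] := by
  induction l with
  | nil => cases hmem
  | cons a l ih =>
    rcases List.mem_cons.1 hmem with rfl | hm
    · rw [List.filter_cons_of_pos hp]
      have hnil : l.filter pred = [] := by
        apply List.filter_eq_nil_iff.2
        intro q hq hpq
        exact ((List.nodup_cons.1 hnd).1 (huniq q (List.mem_cons_of_mem _ hq) hpq ▸ hq)).elim
      rw [hnil]
    · have ha : pred a = false := by
        by_contra hfa
        have heq := huniq a List.mem_cons_self (by simpa using hfa)
        subst heq
        exact (List.nodup_cons.1 hnd).1 hm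
      rw [List.filter_cons_of_neg (by simp [ha])]
      exact ih (List.nodup_cons.1 hnd).2 hm (fun q hq hpq => huniq q (List.mem_cons_of_mem _ hq) hpq)

-- the getLast?-or form of a fold that keeps the last matching element
theorem pvLastOr {α : Type} (p : α) (f : List α) (x : Option α) :
    ((p :: f).getLast?).or x = (f.getLast?).or (some p) := by
  cases f with
  | nil => rfl
  | cons q f =>
    rw [List.getLast?_cons_cons]
    obtain ⟨u, hu⟩ := Option.isSome_iff_exists.1 (List.getLast?_isSome.2 (by simp) :
      ((q :: f).getLast?).isSome)
    rw [hu]; rfl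

-- ---- dict update shapes ----
theorem pvDictUpd_ne (d : PvD) (lk k : PvK) (p : PvP) (hne : k ≠ lk) :
    ((if d.contains lk then d else d.insert lk []).insert lk
      ((if d.contains lk then d else d.insert lk []).getD lk [] ++ [p])).get? k = d.get? k := by
  by_cases h : d.contains lk <;>
    simp [h, PySem.Dict.get?_insert, hne]

theorem pvDictUpd_self (d : PvD) (lk : PvK) (p : PvP) (h0 : d.get? lk = none) :
    ((if d.contains lk then d else d.insert lk []).insert lk
      ((if d.contains lk then d else d.insert lk []).getD lk [] ++ [p])).get? lk = some [p] := by
  have hc : d.contains lk = false := (PySem.Dict.get?_eq_none_iff_contains d lk).1 h0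
  simp [hc, PySem.Dict.getD_insert_self]

theorem pvDictUpdS_ne (d : PvD) (lk k : PvK) (p : PvP) (hne : k ≠ lk) :
    ((d.setdefault lk []).insert lk ((d.setdefault lk []).getD lk [] ++ [p])).get? k = d.get? k := by
  by_cases h : d.contains lk
  · rw [PySem.Dict.setdefault_of_contains _ _ h]
    simp [PySem.Dict.get?_insert, hne]
  · rw [PySem.Dict.setdefault_of_not_contains _ _ (by simpa using h)]
    simp [PySem.Dict.get?_insert, hne]

theorem pvDictUpdS_self (d : PvD) (lk : PvK) (p : PvP) (h0 : d.get? lk = none) :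
    ((d.setdefault lk []).insert lk ((d.setdefault lk []).getD lk [] ++ [p])).get? lk = some [p] := by
  have hc : d.contains lk = false := (PySem.Dict.get?_eq_none_iff_contains d lk).1 h0
  rw [PySem.Dict.setdefault_of_not_contains _ _ hc]
  simp [PySem.Dict.getD_insert_self]

-- ---- A's build fold, one step ----
theorem aStep_corner (st : Option PvP × PvD × PvD) (p : PvP) (hc : pvCorner p = true) :
    aStep st p = (some p, st.2.1, st.2.2) := by simp [aStep, hc]

theorem aStep_fst (st : Option PvP × PvD × PvD) (p : PvP) (hc : pvCorner p = false) :
    (aStep st p).1 = st.1 := by simp [aStep, hc]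

theorem aStep_ld_ne (st : Option PvP × PvD × PvD) (p : PvP) (k : PvK)
    (hc : pvCorner p = false) (hne : k ≠ pvLK p) :
    (aStep st p).2.1.get? k = st.2.1.get? k := by
  simp only [aStep, hc, Bool.false_eq_true, if_false]
  exact pvDictUpd_ne st.2.1 (pvTL p, pvBL p) k p hne

theorem aStep_ld_self (st : Option PvP × PvD × PvD) (p : PvP)
    (hc : pvCorner p = false) (h0 : st.2.1.get? (pvLK p) = none) :
    (aStep st p).2.1.get? (pvLK p) = some [p] := by
  simp only [aStep, hc, Bool.false_eq_true, if_false]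
  exact pvDictUpd_self st.2.1 (pvTL p, pvBL p) p h0

theorem aStep_td_ne (st : Option PvP × PvD × PvD) (p : PvP) (k : PvK)
    (hc : pvCorner p = false) (hne : k ≠ pvTK p) :
    (aStep st p).2.2.get? k = st.2.2.get? k := by
  simp only [aStep, hc, Bool.false_eq_true, if_false]
  exact pvDictUpd_ne st.2.2 (pvTL p, pvTR p) k p hne

theorem aStep_td_self (st : Option PvP × PvD × PvD) (p : PvP)
    (hc : pvCorner p = false) (h0 : st.2.2.get? (pvTK p) = none) :
    (aStep st p).2.2.get? (pvTK p) = some [p] := by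
  simp only [aStep, hc, Bool.false_eq_true, if_false]
  exact pvDictUpd_self st.2.2 (pvTL p, pvTR p) p h0

-- ---- A's build fold ----
theorem aFold_fst (l : List PvP) : ∀ st : Option PvP × PvD × PvD,
    (l.foldl aStep st).1 = ((l.filter pvCorner).getLast?).or st.1 := by
  induction l with
  | nil => intro st; rfl
  | cons p l ih =>
    intro st
    rw [List.foldl_cons, ih]
    by_cases hp : pvCorner p
    · rw [List.filter_cons_of_pos hp, pvLastOr, aStep_corner st p hp]
    · rw [List.filter_cons_of_neg (by simpa using hp), aStep_fst st p (by simpa using hp)]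

theorem aFold_ld_none (l : List PvP) : ∀ (st : Option PvP × PvD × PvD) (k : PvK),
    (∀ p ∈ l, pvCorner p = true ∨ pvLK p ≠ k) →
    (l.foldl aStep st).2.1.get? k = st.2.1.get? k := by
  induction l with
  | nil => intro st k _; rfl
  | cons p l ih =>
    intro st k h
    rw [List.foldl_cons, ih _ k (fun q hq => h q (List.mem_cons_of_mem _ hq))]
    rcases h p List.mem_cons_self with hp | hp
    · rw [aStep_corner st p hp]
    · by_cases hc : pvCorner p
      · rw [aStep_corner st p hc]
      · exact aStep_ld_ne st p k (by simpa using hc) (fun he => hp he.symm)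

theorem aFold_td_none (l : List PvP) : ∀ (st : Option PvP × PvD × PvD) (k : PvK),
    (∀ p ∈ l, pvCorner p = true ∨ pvTK p ≠ k) →
    (l.foldl aStep st).2.2.get? k = st.2.2.get? k := by
  induction l with
  | nil => intro st k _; rfl
  | cons p l ih =>
    intro st k h
    rw [List.foldl_cons, ih _ k (fun q hq => h q (List.mem_cons_of_mem _ hq))]
    rcases h p List.mem_cons_self with hp | hp
    · rw [aStep_corner st p hp]
    · by_cases hc : pvCorner p
      · rw [aStep_corner st p hc]
      · exact aStep_td_ne st p k (by simpa using hc) (fun he => hp he.symm)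

theorem aFold_ld_single (l : List PvP) : ∀ (st : Option PvP × PvD × PvD) (k : PvK) (c : PvP),
    l.filter (fun p => !pvCorner p && (pvLK p == k)) = [c] →
    st.2.1.get? k = none →
    (l.foldl aStep st).2.1.get? k = some [c] := by
  induction l with
  | nil => intro st k c h _; cases h
  | cons p l ih =>
    intro st k c hf h0
    rw [List.foldl_cons]
    by_cases hc : pvCorner p
    · rw [List.filter_cons_of_neg (by simp [hc])] at hf
      exact ih _ k c hf (by rw [aStep_corner st p hc]; exact h0)
    · by_cases hk : pvLK p = k
      · rw [List.filter_cons_of_pos (by simp [hc, hk])] at hf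
        obtain ⟨hpc, hrest⟩ := List.cons_eq_cons.1 hf
        subst hpc
        rw [aFold_ld_none l _ k ?uniq]
        · rw [← hk]
          exact aStep_ld_self st p (by simpa using hc) (hk ▸ h0)
        case uniq =>
          intro q hq
          have hnq := List.filter_eq_nil_iff.1 hrest q hq
          by_cases hcq : pvCorner q
          · exact Or.inl hcq
          · exact Or.inr (fun he => hnq (by simp [hcq, he]))
      · rw [List.filter_cons_of_neg (by simp [hc, hk])] at hf
        apply ih _ k c hf
        rw [aStep_ld_ne st p k (by simpa using hc) (fun he => hk he.symm)]
        exact h0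

theorem aFold_td_single (l : List PvP) : ∀ (st : Option PvP × PvD × PvD) (k : PvK) (c : PvP),
    l.filter (fun p => !pvCorner p && (pvTK p == k)) = [c] →
    st.2.2.get? k = none →
    (l.foldl aStep st).2.2.get? k = some [c] := by
  induction l with
  | nil => intro st k c h _; cases h
  | cons p l ih =>
    intro st k c hf h0
    rw [List.foldl_cons]
    by_cases hc : pvCorner p
    · rw [List.filter_cons_of_neg (by simp [hc])] at hf
      exact ih _ k c hf (by rw [aStep_corner st p hc]; exact h0)
    · by_cases hk : pvTK p = k
      · rw [List.filter_cons_of_pos (by simp [hc, hk])] at hf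
        obtain ⟨hpc, hrest⟩ := List.cons_eq_cons.1 hf
        subst hpc
        rw [aFold_td_none l _ k ?uniq]
        · rw [← hk]
          exact aStep_td_self st p (by simpa using hc) (hk ▸ h0)
        case uniq =>
          intro q hq
          have hnq := List.filter_eq_nil_iff.1 hrest q hq
          by_cases hcq : pvCorner q
          · exact Or.inl hcq
          · exact Or.inr (fun he => hnq (by simp [hcq, he]))
      · rw [List.filter_cons_of_neg (by simp [hc, hk])] at hf
        apply ih _ k c hf
        rw [aStep_td_ne st p k (by simpa using hc) (fun he => hk he.symm)]
        exact h0

-- ---- B's split and dict folds ----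
theorem bSplit_fst (l : List PvP) : ∀ st : Option PvP × List PvP,
    (l.foldl bSplitStep st).1 = ((l.filter bCorner).getLast?).or st.1 := by
  induction l with
  | nil => intro st; rfl
  | cons p l ih =>
    intro st
    rw [List.foldl_cons, ih]
    by_cases hp : bCorner p
    · rw [List.filter_cons_of_pos hp, pvLastOr]
      simp [bSplitStep, hp]
    · rw [List.filter_cons_of_neg (by simpa using hp)]
      simp [bSplitStep, hp]

theorem bSplit_snd (l : List PvP) : ∀ st : Option PvP × List PvP,
    (l.foldl bSplitStep st).2 = st.2 ++ l.filter (fun p => !bCorner p) := by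
  induction l with
  | nil => intro st; simp
  | cons p l ih =>
    intro st
    rw [List.foldl_cons, ih]
    by_cases hp : bCorner p
    · rw [List.filter_cons_of_neg (by simp [hp])]
      simp [bSplitStep, hp]
    · rw [List.filter_cons_of_pos (by simp [hp])]
      simp [bSplitStep, hp]

theorem bDict_ld_ne (st : PvD × PvD) (p : PvP) (k : PvK) (hne : k ≠ (bTL p, bBL p)) :
    (bDictStep st p).1.get? k = st.1.get? k :=
  pvDictUpdS_ne st.1 (bTL p, bBL p) k p hne

theorem bDict_ld_self (st : PvD × PvD) (p : PvP) (h0 : st.1.get? (bTL p, bBL p) = none) :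
    (bDictStep st p).1.get? (bTL p, bBL p) = some [p] :=
  pvDictUpdS_self st.1 (bTL p, bBL p) p h0

theorem bDict_td_ne (st : PvD × PvD) (p : PvP) (k : PvK) (hne : k ≠ (bTL p, bTR p)) :
    (bDictStep st p).2.get? k = st.2.get? k :=
  pvDictUpdS_ne st.2 (bTL p, bTR p) k p hne

theorem bDict_td_self (st : PvD × PvD) (p : PvP) (h0 : st.2.get? (bTL p, bTR p) = none) :
    (bDictStep st p).2.get? (bTL p, bTR p) = some [p] :=
  pvDictUpdS_self st.2 (bTL p, bTR p) p h0

theorem bFold_ld_none (l : List PvP) : ∀ (st : PvD × PvD) (k : PvK),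
    (∀ p ∈ l, (bTL p, bBL p) ≠ k) →
    (l.foldl bDictStep st).1.get? k = st.1.get? k := by
  induction l with
  | nil => intro st k _; rfl
  | cons p l ih =>
    intro st k h
    rw [List.foldl_cons, ih _ k (fun q hq => h q (List.mem_cons_of_mem _ hq))]
    exact bDict_ld_ne st p k (fun he => h p List.mem_cons_self he.symm)

theorem bFold_td_none (l : List PvP) : ∀ (st : PvD × PvD) (k : PvK),
    (∀ p ∈ l, (bTL p, bTR p) ≠ k) →
    (l.foldl bDictStep st).2.get? k = st.2.get? k := by
  induction l with
  | nil => intro st k _; rfl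
  | cons p l ih =>
    intro st k h
    rw [List.foldl_cons, ih _ k (fun q hq => h q (List.mem_cons_of_mem _ hq))]
    exact bDict_td_ne st p k (fun he => h p List.mem_cons_self he.symm)

theorem bFold_ld_single (l : List PvP) : ∀ (st : PvD × PvD) (k : PvK) (c : PvP),
    l.filter (fun p => (bTL p, bBL p) == k) = [c] →
    st.1.get? k = none →
    (l.foldl bDictStep st).1.get? k = some [c] := by
  induction l with
  | nil => intro st k c h _; cases h
  | cons p l ih =>
    intro st k c hf h0
    rw [List.foldl_cons]
    by_cases hk : (bTL p, bBL p) = k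
    · rw [List.filter_cons_of_pos (by simp [hk])] at hf
      obtain ⟨hpc, hrest⟩ := List.cons_eq_cons.1 hf
      subst hpc
      rw [bFold_ld_none l _ k ?uniq]
      · rw [← hk]
        exact bDict_ld_self st p (hk ▸ h0)
      case uniq =>
        intro q hq he
        exact List.filter_eq_nil_iff.1 hrest q hq (by simp [he])
    · rw [List.filter_cons_of_neg (by simp [hk])] at hf
      apply ih _ k c hf
      rw [bDict_ld_ne st p k (fun he => hk he.symm)]
      exact h0

theorem bFold_td_single (l : List PvP) : ∀ (st : PvD × PvD) (k : PvK) (c : PvP),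
    l.filter (fun p => (bTL p, bTR p) == k) = [c] →
    st.2.get? k = none →
    (l.foldl bDictStep st).2.get? k = some [c] := by
  induction l with
  | nil => intro st k c h _; cases h
  | cons p l ih =>
    intro st k c hf h0
    rw [List.foldl_cons]
    by_cases hk : (bTL p, bTR p) = k
    · rw [List.filter_cons_of_pos (by simp [hk])] at hf
      obtain ⟨hpc, hrest⟩ := List.cons_eq_cons.1 hf
      subst hpc
      rw [bFold_td_none l _ k ?uniq]
      · rw [← hk]
        exact bDict_td_self st p (hk ▸ h0)
      case uniq =>
        intro q hq he
        exact List.filter_eq_nil_iff.1 hrest q hq (by simp [he])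
    · rw [List.filter_cons_of_neg (by simp [hk])] at hf
      apply ih _ k c hf
      rw [bDict_td_ne st p k (fun he => hk he.symm)]
      exact h0

-- ---- pops ----
theorem aPop_single (d : PvD) (k : PvK) (c : PvP) (h : d.get? k = some [c]) :
    aPop d k = (some c, d.insert k []) := by
  simp [aPop, h]

theorem bPop_single (d : PvD) (k : PvK) (c : PvP) (h : d.get? k = some [c]) :
    bPop d k = (some c, d.insert k []) := by
  simp [bPop, h]

-- ---- walkers: under singleton buckets the pop chains reproduce a given list ----
theorem aFillRight_spec (ps : List PvP) : ∀ (prev : PvP) (d : PvD),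
    List.Chain (fun a b => pvLK b = pvRK a) prev ps →
    (∀ p ∈ ps, d.get? (pvLK p) = some [p]) →
    List.Pairwise (fun a b => pvLK a ≠ pvLK b) ps →
    (aFillRight ps.length prev d).1 = ps := by
  induction ps with
  | nil => intro prev d _ _ _; rfl
  | cons p ps ih =>
    intro prev d hch hbk hpw
    obtain ⟨hlink, htail⟩ := List.chain_cons.1 hch
    have hget : d.get? (pvTR prev, pvBR prev) = some [p] := by
      have h := hbk p List.mem_cons_self
      rw [hlink] at h
      exact h
    show (aFillRight (ps.length + 1) prev d).1 = p :: ps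
    simp only [aFillRight]
    rw [aPop_single d _ p hget]
    simp only [Option.getD_some]
    refine congrArg _ (ih p _ htail ?bk (List.pairwise_cons.1 hpw).2)
    intro q hq
    rw [PySem.Dict.get?_insert,
      if_neg (fun he => ((List.pairwise_cons.1 hpw).1 q hq) (hlink.trans he.symm))]
    exact hbk q (List.mem_cons_of_mem _ hq)

theorem aFillBelow_spec (above : List PvP) : ∀ (ps : List PvP) (d : PvD),
    List.Forall₂ (fun a p => pvTK p = pvBK a) above ps →
    (∀ p ∈ ps, d.get? (pvTK p) = some [p]) →
    List.Pairwise (fun a b => pvTK a ≠ pvTK b) ps →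
    (aFillBelow above d).1 = ps ∧
      ∀ k, (∀ p ∈ ps, pvTK p ≠ k) → (aFillBelow above d).2.get? k = d.get? k := by
  induction above with
  | nil =>
    intro ps d hf _ _
    cases hf
    exact ⟨rfl, fun k _ => rfl⟩
  | cons a above ih =>
    intro ps d hf hbk hpw
    rcases hf with _ | ⟨hlink, htail⟩
    rename_i p ps
    have hget : d.get? (pvBL a, pvBR a) = some [p] := by
      have h := hbk p List.mem_cons_self
      rw [hlink] at h
      exact h
    have hstep : ∀ q ∈ ps, (d.insert (pvBL a, pvBR a) []).get? (pvTK q) = some [q] := by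
      intro q hq
      rw [PySem.Dict.get?_insert,
        if_neg (fun he => ((List.pairwise_cons.1 hpw).1 q hq) (hlink.trans he.symm))]
      exact hbk q (List.mem_cons_of_mem _ hq)
    obtain ⟨ih1, ih2⟩ := ih ps _ htail hstep (List.pairwise_cons.1 hpw).2
    constructor
    · show (aFillBelow (a :: above) d).1 = p :: ps
      simp only [aFillBelow]
      rw [aPop_single d _ p hget]
      simp only [Option.getD_some]
      exact congrArg _ ih1
    · intro k hk
      show (aFillBelow (a :: above) d).2.get? k = d.get? k
      simp only [aFillBelow]
      rw [aPop_single d _ p hget]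
      rw [ih2 k (fun q hq => hk q (List.mem_cons_of_mem _ hq))]
      rw [PySem.Dict.get?_insert,
        if_neg (fun he => hk p List.mem_cons_self (hlink.trans he.symm))]

theorem aFillRows_spec (rows : List (List PvP)) : ∀ (above : List PvP) (d : PvD),
    List.Chain (fun r r' => List.Forall₂ (fun a p => pvTK p = pvBK a) r r') above rows →
    (∀ p ∈ rows.flatten, d.get? (pvTK p) = some [p]) →
    List.Pairwise (fun a b => pvTK a ≠ pvTK b) rows.flatten →
    aFillRows rows.length above d = rows := by
  induction rows with
  | nil => intro above d _ _ _; rfl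
  | cons r rows ih =>
    intro above d hch hbk hpw
    obtain ⟨hf2, htail⟩ := List.chain_cons.1 hch
    rw [List.flatten_cons] at hbk hpw
    obtain ⟨hpw1, hpw2, hcross⟩ := (List.pairwise_append).1 hpw
    obtain ⟨hrow, hpres⟩ := aFillBelow_spec above r d hf2
      (fun p hp => hbk p (List.mem_append_left _ hp)) hpw1
    show aFillRows (rows.length + 1) above d = r :: rows
    simp only [aFillRows]
    rw [hrow]
    refine congrArg _ (ih r _ htail ?bk hpw2)
    intro p hp
    rw [hpres (pvTK p) (fun q hq he => hcross q hq p hp he)]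
    exact hbk p (List.mem_append_right _ hp)

theorem bRowTail_spec (ps : List PvP) : ∀ (prev : PvP) (d : PvD),
    List.Chain (fun a b => (bTL b, bBL b) = (bTR a, bBR a)) prev ps →
    (∀ p ∈ ps, d.get? (bTL p, bBL p) = some [p]) →
    List.Pairwise (fun a b => (bTL a, bBL a) ≠ (bTL b, bBL b)) ps →
    (bRowTail ps.length prev d).1 = ps ∧
      ∀ k, (∀ p ∈ ps, (bTL p, bBL p) ≠ k) → (bRowTail ps.length prev d).2.get? k = d.get? k := by
  induction ps with
  | nil => intro prev d _ _ _; exact ⟨rfl, fun k _ => rfl⟩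
  | cons p ps ih =>
    intro prev d hch hbk hpw
    obtain ⟨hlink, htail⟩ := List.chain_cons.1 hch
    have hget : d.get? (bTR prev, bBR prev) = some [p] := by
      have h := hbk p List.mem_cons_self
      rw [hlink] at h
      exact h
    have hstep : ∀ q ∈ ps, (d.insert (bTR prev, bBR prev) []).get? (bTL q, bBL q) = some [q] := by
      intro q hq
      rw [PySem.Dict.get?_insert,
        if_neg (fun he => ((List.pairwise_cons.1 hpw).1 q hq) (hlink.trans he.symm))]
      exact hbk q (List.mem_cons_of_mem _ hq)
    obtain ⟨ih1, ih2⟩ := ih p _ htail hstep (List.pairwise_cons.1 hpw).2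
    constructor
    · show (bRowTail (ps.length + 1) prev d).1 = p :: ps
      simp only [bRowTail]
      rw [bPop_single d _ p hget]
      simp only [Option.getD_some]
      exact congrArg _ ih1
    · intro k hk
      show (bRowTail (ps.length + 1) prev d).2.get? k = d.get? k
      simp only [bRowTail]
      rw [bPop_single d _ p hget]
      simp only [Option.getD_some]
      rw [ih2 k (fun q hq => hk q (List.mem_cons_of_mem _ hq))]
      rw [PySem.Dict.get?_insert,
        if_neg (fun he => hk p List.mem_cons_self (hlink.trans he.symm))]

theorem bGridGo_spec (rows : List (List PvP)) : ∀ (pr : List PvP) (n : Nat) (ld td : PvD) (c : PvP),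
    (∀ r ∈ rows, r.tail.length = n ∧ r ≠ []) →
    List.Chain (fun r r' => (bTL (r'.headD pvDummy), bTR (r'.headD pvDummy)) = (bBL (r.headD pvDummy), bBR (r.headD pvDummy))) pr rows →
    (∀ r ∈ rows, td.get? (bTL (r.headD pvDummy), bTR (r.headD pvDummy)) = some [r.headD pvDummy]) →
    List.Pairwise (fun r r' => (bTL (r.headD pvDummy), bTR (r.headD pvDummy)) ≠ (bTL (r'.headD pvDummy), bTR (r'.headD pvDummy))) rows →
    (∀ r ∈ rows, List.Chain (fun a b => (bTL b, bBL b) = (bTR a, bBR a)) (r.headD pvDummy) r.tail) →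
    (∀ p ∈ (rows.map List.tail).flatten, ld.get? (bTL p, bBL p) = some [p]) →
    List.Pairwise (fun a b => (bTL a, bBL a) ≠ (bTL b, bBL b)) (rows.map List.tail).flatten →
    bGridGo rows.length (some pr) c (n + 1) ld td = rows := by
  induction rows with
  | nil => intro pr n ld td c _ _ _ _ _ _ _; rfl
  | cons r rows ih =>
    intro pr n ld td c hshape hch htbk htpw hlch hlbk hlpw
    obtain ⟨hlink, htail⟩ := List.chain_cons.1 hch
    obtain ⟨hrlen, hrne⟩ := hshape r List.mem_cons_self
    have hget : td.get? (bBL (pr.headD pvDummy), bBR (pr.headD pvDummy)) = some [r.headD pvDummy] := by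
      have h := htbk r List.mem_cons_self
      rw [hlink] at h
      exact h
    rw [List.map_cons, List.flatten_cons] at hlbk hlpw
    obtain ⟨hlpw1, hlpw2, hlcross⟩ := (List.pairwise_append).1 hlpw
    obtain ⟨hrow, hpres⟩ := bRowTail_spec r.tail (r.headD pvDummy) ld (hlch r List.mem_cons_self)
      (fun p hp => hlbk p (List.mem_append_left _ hp)) hlpw1
    have hhd : r.headD pvDummy :: r.tail = r := by
      cases r with
      | nil => exact (hrne rfl).elim
      | cons a t => rfl
    show bGridGo (rows.length + 1) (some pr) c (n + 1) ld td = r :: rows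
    simp only [bGridGo]
    rw [bPop_single td _ (r.headD pvDummy) hget]
    simp only [Option.getD_some]
    rw [← hrlen, hrow, hhd]
    refine congrArg _ ?_
    rw [ih r r.tail.length _ _ c (fun q hq => ⟨(hshape q (List.mem_cons_of_mem _ hq)).1.trans hrlen.symm, (hshape q (List.mem_cons_of_mem _ hq)).2⟩) htail ?tbk
      (List.pairwise_cons.1 htpw).2 (fun q hq => hlch q (List.mem_cons_of_mem _ hq)) ?lbk hlpw2]
    case tbk =>
      intro q hq
      rw [PySem.Dict.get?_insert,
        if_neg (fun he => ((List.pairwise_cons.1 htpw).1 q hq) (hlink.trans he.symm))]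
      exact htbk q (List.mem_cons_of_mem _ hq)
    case lbk =>
      intro p hp
      rw [hpres (bTL p, bBL p) (fun q hq he => hlcross q hq p hp he)]
      exact hlbk p (List.mem_append_right _ hp)

theorem bGridGo_unfold (k n : Nat) (hk : 1 ≤ k) (hn : 1 ≤ n) (c : PvP) (ld td : PvD) :
    bGridGo k none c n ld td =
      (c :: (bRowTail (n - 1) c ld).1) ::
        bGridGo (k - 1) (some (c :: (bRowTail (n - 1) c ld).1)) c n (bRowTail (n - 1) c ld).2 td := by
  obtain ⟨k', rfl⟩ : ∃ k', k = k' + 1 := ⟨k - 1, by omega⟩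
  obtain ⟨n', rfl⟩ : ∃ n', n = n' + 1 := ⟨n - 1, by omega⟩
  simp only [Nat.add_sub_cancel]
  rfl

theorem bGridGo_spec' (rows : List (List PvP)) (pr : List PvP) (n : Nat) (hn : 1 ≤ n)
    (ld td : PvD) (c : PvP)
    (hshape : ∀ r ∈ rows, r.tail.length = n - 1 ∧ r ≠ [])
    (hch : List.Chain (fun r r' => (bTL (r'.headD pvDummy), bTR (r'.headD pvDummy)) = (bBL (r.headD pvDummy), bBR (r.headD pvDummy))) pr rows)
    (htbk : ∀ r ∈ rows, td.get? (bTL (r.headD pvDummy), bTR (r.headD pvDummy)) = some [r.headD pvDummy])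
    (htpw : List.Pairwise (fun r r' => (bTL (r.headD pvDummy), bTR (r.headD pvDummy)) ≠ (bTL (r'.headD pvDummy), bTR (r'.headD pvDummy))) rows)
    (hlch : ∀ r ∈ rows, List.Chain (fun a b => (bTL b, bBL b) = (bTR a, bBR a)) (r.headD pvDummy) r.tail)
    (hlbk : ∀ p ∈ (rows.map List.tail).flatten, ld.get? (bTL p, bBL p) = some [p])
    (hlpw : List.Pairwise (fun a b => (bTL a, bBL a) ≠ (bTL b, bBL b)) (rows.map List.tail).flatten) :
    bGridGo rows.length (some pr) c n ld td = rows := by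
  obtain ⟨m, rfl⟩ : ∃ m, n = m + 1 := ⟨n - 1, by omega⟩
  exact bGridGo_spec rows pr m ld td c
    (fun r hr => ⟨by simpa using (hshape r hr).1, (hshape r hr).2⟩) hch htbk htpw hlch hlbk hlpw

-- ---- range helpers ----
theorem pvRangeSplit {α : Type} (f : Nat → α) (n : Nat) (h : 1 ≤ n) :
    (List.range n).map f = f 0 :: (List.range (n - 1)).map (fun i => f (i + 1)) := by
  obtain ⟨m, rfl⟩ : ∃ m, n = m + 1 := ⟨n - 1, by omega⟩
  rw [List.range_succ_eq_map]
  simp [List.map_map, Function.comp_def, Nat.succ_eq_add_one]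

theorem pvChainRange {α : Type} (R : α → α → Prop) (f : Nat → α) :
    ∀ (n s : Nat), (∀ i, s ≤ i → i + 1 ≤ s + n → R (f i) (f (i + 1))) →
    List.Chain R (f s) ((List.range n).map (fun i => f (s + i + 1))) := by
  intro n
  induction n with
  | zero => intro s _; exact List.Chain.nil
  | succ m ih =>
    intro s h
    rw [List.range_succ_eq_map, List.map_cons]
    refine List.Chain.cons (by simpa using h s le_rfl (by omega)) ?_
    have hmap : (List.map Nat.succ (List.range m)).map (fun i => f (s + i + 1)) =
        (List.range m).map (fun i => f ((s + 1) + i + 1)) := by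
      rw [List.map_map]
      refine List.map_congr_left (fun i _ => ?_)
      simp only [Function.comp_apply, Nat.succ_eq_add_one]
      congr 1
      omega
    rw [hmap]
    exact ih (s + 1) (fun i hi hi2 => h i (by omega) (by omega))

theorem pvForall2Range {α β : Type} (P : α → β → Prop) :
    ∀ (n : Nat) (f : Nat → α) (g : Nat → β), (∀ i, i < n → P (f i) (g i)) →
    List.Forall₂ P ((List.range n).map f) ((List.range n).map g) := by
  intro n
  induction n with
  | zero => intro f g _; simp
  | succ m ih =>
    intro f g h
    rw [List.range_succ_eq_map, List.map_cons, List.map_cons, List.map_map, List.map_map]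
    refine List.Forall₂.cons (h 0 (by omega)) ?_
    exact ih (f ∘ Nat.succ) (g ∘ Nat.succ) (fun i hi => h (i + 1) (by omega))

theorem pvPairwiseRange {α : Type} (R : α → α → Prop) (f : Nat → α) (n : Nat)
    (h : ∀ i j, i < j → j < n → R (f i) (f j)) :
    List.Pairwise R ((List.range n).map f) := by
  rw [List.pairwise_map]
  exact List.Pairwise.imp_of_mem
    (fun {a b} ha hb hab => h a b hab (List.mem_range.1 hb)) List.pairwise_lt_range

-- ---- grid cells ----
def pvG (σ : List PvP) (W y x : Nat) : PvP := σ.getD (y * W + x) pvDummy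

theorem pvIdxLt (W H y x : Nat) (hy : y < H) (hx : x < W) : y * W + x < W * H := by
  calc y * W + x < (y + 1) * W := by rw [Nat.add_mul, Nat.one_mul]; omega
  _ ≤ H * W := Nat.mul_le_mul_right W hy
  _ = W * H := Nat.mul_comm H W

theorem pvIdxInj (W H y x y' x' : Nat) (hy : y < H) (hx : x < W) (hy' : y' < H) (hx' : x' < W)
    (he : y * W + x = y' * W + x') : y = y' ∧ x = x' := by
  have hW : 0 < W := Nat.lt_of_le_of_lt (Nat.zero_le x) hx
  have h1 : (y * W + x) / W = y := by
    rw [Nat.mul_comm y W, Nat.mul_add_div hW, Nat.div_eq_of_lt hx, Nat.add_zero]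
  have h2 : (y' * W + x') / W = y' := by
    rw [Nat.mul_comm y' W, Nat.mul_add_div hW, Nat.div_eq_of_lt hx', Nat.add_zero]
  have h3 : (y * W + x) % W = x := by
    rw [Nat.mul_comm y W, Nat.mul_add_mod, Nat.mod_eq_of_lt hx]
  have h4 : (y' * W + x') % W = x' := by
    rw [Nat.mul_comm y' W, Nat.mul_add_mod, Nat.mod_eq_of_lt hx']
  constructor
  · rw [← h1, ← h2, he]
  · rw [← h3, ← h4, he]

theorem bGridGo_zeroW : ∀ (k : Nat) (prev : Option (List PvP)) (c : PvP) (ld td : PvD),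
    bGridGo k prev c 0 ld td = List.replicate k [] := by
  intro k
  induction k with
  | zero => intro prev c ld td; rfl
  | succ m ih =>
    intro prev c ld td
    show [] :: bGridGo m (some []) c 0 ld td = List.replicate (m + 1) []
    rw [ih, List.replicate_succ]

-- the rows of the claimed tiling
def pvT (σ : List PvP) (W y : Nat) : List PvP := (List.range (W - 1)).map (fun i => pvG σ W y (i + 1))
def pvF (σ : List PvP) (W y : Nat) : List PvP := pvG σ W y 0 :: pvT σ W y
def pvRS (σ : List PvP) (W H : Nat) : List (List PvP) := (List.range (H - 1)).map (fun j => pvF σ W (j + 1))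

-- the well-formed case: both programs reconstruct the (unique) tiling row-major
theorem pvMainCase (pieces : List (List (Option Int) × List (Option Int) × Int)) (width height : Int)
    (hlen2 : ∀ p ∈ pieces, p.1.length = 2 ∧ p.2.1.length = 2)
    (hw : 1 ≤ width) (hh : 1 ≤ height)
    (hlen : pieces.length = width.toNat * height.toNat)
    (σ : List PvP) (hσmem : σ ∈ pieces.permutations)
    (hgood : pvGood σ width.toNat height.toNat) :
    puzzle_solver pieces width height = puzzle_solver_alt pieces width height := by
  obtain ⟨hc0, hnc, hnd, hhor, hver, hLU, hTU⟩ := hgood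
  set W := width.toNat with hWdef
  set H := height.toNat with hHdef
  have hW : 1 ≤ W := by omega
  have hH : 1 ≤ H := by omega
  have hperm : σ.Perm pieces := List.mem_permutations.1 hσmem
  have hσlen : σ.length = W * H := by rw [hperm.length_eq, hlen]
  have hidx : ∀ y x, y < H → x < W → y * W + x < σ.length := by
    intro y x hy hx; rw [hσlen]; exact pvIdxLt W H y x hy hx
  have hGelem : ∀ y x, (hy : y < H) → (hx : x < W) → pvG σ W y x = σ[y * W + x]'(hidx y x hy hx) := by
    intro y x hy hx; exact List.getD_eq_getElem σ pvDummy (hidx y x hy hx)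
  have hGmemσ : ∀ y x, y < H → x < W → pvG σ W y x ∈ σ := by
    intro y x hy hx; rw [hGelem y x hy hx]; exact List.getElem_mem _
  have hGmem : ∀ y x, y < H → x < W → pvG σ W y x ∈ pieces := by
    intro y x hy hx; exact hperm.mem_iff.1 (hGmemσ y x hy hx)
  have hGinj : ∀ y x y' x', y < H → x < W → y' < H → x' < W →
      pvG σ W y x = pvG σ W y' x' → y = y' ∧ x = x' := by
    intro y x y' x' hy hx hy' hx' he
    rw [hGelem y x hy hx, hGelem y' x' hy' hx'] at he
    exact pvIdxInj W H y x y' x' hy hx hy' hx' ((hnd.getElem_inj_iff).1 he)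
  have hG00 : pvCorner (pvG σ W 0 0) = true := by
    have h0 : (0 : Nat) * W + 0 = 0 := by omega
    rw [pvG, h0]; exact hc0
  have hncG : ∀ y x, y < H → x < W → y + x ≠ 0 → pvCorner (pvG σ W y x) = false := by
    intro y x hy hx hyx
    refine hnc (y * W + x) (List.mem_range.2 (pvIdxLt W H y x hy hx)) ?_
    intro h0
    have hx0 : x = 0 := by omega
    have hyW : y * W = 0 := by omega
    rcases Nat.mul_eq_zero.1 hyW with h | h <;> omega
  have hσfilter : σ.filter pvCorner = [pvG σ W 0 0] := by
    refine pvFilterSingletonU σ pvCorner _ hnd (hGmemσ 0 0 hH hW) hG00 ?_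
    intro q hq hcq
    obtain ⟨i, hi, rfl⟩ := List.mem_iff_getElem.1 hq
    by_cases hi0 : i = 0
    · subst hi0
      rw [hGelem 0 0 hH hW]
      congr 1
      omega
    · exfalso
      have hf := hnc i (List.mem_range.2 (by omega)) hi0
      rw [List.getD_eq_getElem σ pvDummy hi] at hf
      rw [hf] at hcq
      cases hcq
  have hfilterA : pieces.filter pvCorner = [pvG σ W 0 0] := by
    have hp := hperm.filter pvCorner
    rw [hσfilter] at hp
    exact List.perm_singleton.1 hp.symm
  -- singleton buckets
  have hbLfilter : ∀ y x, y < H → 1 ≤ x → x < W →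
      pieces.filter (fun q => !pvCorner q && (pvLK q == pvLK (pvG σ W y x))) = [pvG σ W y x] := by
    intro y x hy hx1 hx
    refine pvFilterSingleton _ _ _ ?_ (hGmem y x hy hx) (by simp [hncG y x hy hx (by omega)])
    rw [← hperm.countP_eq]
    have hcnt := hLU y (List.mem_range.2 hy) (x - 1) (List.mem_range.2 (by omega))
    have hxx : y * W + (x - 1) + 1 = y * W + x := by omega
    rw [hxx] at hcnt
    simpa [pvG] using hcnt
  have hbTfilter : ∀ y x, 1 ≤ y → y < H → x < W →
      pieces.filter (fun q => !pvCorner q && (pvTK q == pvTK (pvG σ W y x))) = [pvG σ W y x] := by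
    intro y x hy1 hy hx
    refine pvFilterSingleton _ _ _ ?_ (hGmem y x hy hx) (by simp [hncG y x hy hx (by omega)])
    rw [← hperm.countP_eq]
    have hcnt := hTU (y - 1) (List.mem_range.2 (by omega)) x (List.mem_range.2 hx)
    have hyy : (y - 1 + 1) * W + x = y * W + x := by
      have : y - 1 + 1 = y := by omega
      rw [this]
    rw [hyy] at hcnt
    simpa [pvG] using hcnt
  -- queried keys are distinct across distinct cells
  have hkL : ∀ y x y' x', y < H → 1 ≤ x → x < W → y' < H → 1 ≤ x' → x' < W →
      ¬(y = y' ∧ x = x') → pvLK (pvG σ W y x) ≠ pvLK (pvG σ W y' x') := by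
    intro y x y' x' hy hx1 hx hy' hx1' hx' hne he
    have h1 := hbLfilter y x hy hx1 hx
    have hmem2 : pvG σ W y' x' ∈ pieces.filter (fun q => !pvCorner q && (pvLK q == pvLK (pvG σ W y x))) :=
      List.mem_filter.2 ⟨hGmem y' x' hy' hx', by simp [hncG y' x' hy' hx' (by omega), he]⟩
    rw [h1] at hmem2
    simp only [List.mem_singleton] at hmem2
    have hinj := hGinj y' x' y x hy' hx' hy hx hmem2
    exact hne ⟨hinj.1.symm, hinj.2.symm⟩
  have hkT : ∀ y x y' x', 1 ≤ y → y < H → x < W → 1 ≤ y' → y' < H → x' < W →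
      ¬(y = y' ∧ x = x') → pvTK (pvG σ W y x) ≠ pvTK (pvG σ W y' x') := by
    intro y x y' x' hy1 hy hx hy1' hy' hx' hne he
    have h1 := hbTfilter y x hy1 hy hx
    have hmem2 : pvG σ W y' x' ∈ pieces.filter (fun q => !pvCorner q && (pvTK q == pvTK (pvG σ W y x))) :=
      List.mem_filter.2 ⟨hGmem y' x' hy' hx', by simp [hncG y' x' hy' hx' (by omega), he]⟩
    rw [h1] at hmem2
    simp only [List.mem_singleton] at hmem2
    have hinj := hGinj y' x' y x hy' hx' hy hx hmem2
    exact hne ⟨hinj.1.symm, hinj.2.symm⟩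
  -- shapes of the tiling rows
  have hTlen : ∀ y, (pvT σ W y).length = W - 1 := by intro y; simp [pvT]
  have hTmem : ∀ y p, p ∈ pvT σ W y → ∃ i, i + 1 < W ∧ p = pvG σ W y (i + 1) := by
    intro y p hp
    obtain ⟨i, hi, rfl⟩ := List.mem_map.1 hp
    exact ⟨i, by have := List.mem_range.1 hi; omega, rfl⟩
  have hRSmem : ∀ r, r ∈ pvRS σ W H → ∃ j, j + 1 < H ∧ r = pvF σ W (j + 1) := by
    intro r hr
    obtain ⟨j, hj, rfl⟩ := List.mem_map.1 hr
    exact ⟨j, by have := List.mem_range.1 hj; omega, rfl⟩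
  have hFmem : ∀ y p, p ∈ pvF σ W y → (p = pvG σ W y 0 ∨ ∃ i, i + 1 < W ∧ p = pvG σ W y (i + 1)) := by
    intro y p hp
    rcases List.mem_cons.1 hp with rfl | hpt
    · exact Or.inl rfl
    · exact Or.inr (hTmem y p hpt)
  -- A's dicts
  set stA := pieces.foldl aStep (none, PySem.Dict.empty, PySem.Dict.empty) with hstA
  have hcornerA : stA.1 = some (pvG σ W 0 0) := by
    rw [hstA, aFold_fst, hfilterA]; rfl
  have hldA : ∀ y x, y < H → 1 ≤ x → x < W →
      stA.2.1.get? (pvLK (pvG σ W y x)) = some [pvG σ W y x] := by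
    intro y x hy hx1 hx
    rw [hstA]
    exact aFold_ld_single pieces _ _ _ (hbLfilter y x hy hx1 hx) (PySem.Dict.get?_empty _)
  have htdA : ∀ y x, 1 ≤ y → y < H → x < W →
      stA.2.2.get? (pvTK (pvG σ W y x)) = some [pvG σ W y x] := by
    intro y x hy1 hy hx
    rw [hstA]
    exact aFold_td_single pieces _ _ _ (hbTfilter y x hy1 hy hx) (PySem.Dict.get?_empty _)
  -- A: the top row
  have hT0chain : List.Chain (fun a b => pvLK b = pvRK a) (pvG σ W 0 0) (pvT σ W 0) := by
    have hc := pvChainRange (fun a b => pvLK b = pvRK a) (fun x => pvG σ W 0 x) (W - 1) 0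
      (fun i hi0 hi1 => hhor 0 (List.mem_range.2 hH) i (List.mem_range.2 (by omega)))
    simpa [pvT] using hc
  have hT0bk : ∀ p ∈ pvT σ W 0, stA.2.1.get? (pvLK p) = some [p] := by
    intro p hp
    obtain ⟨i, hi, rfl⟩ := hTmem 0 p hp
    exact hldA 0 (i + 1) hH (by omega) hi
  have hT0pw : List.Pairwise (fun a b => pvLK a ≠ pvLK b) (pvT σ W 0) :=
    pvPairwiseRange _ _ _ (fun i j hij hj =>
      hkL 0 (i + 1) 0 (j + 1) hH (by omega) (by omega) hH (by omega) (by omega) (by omega))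
  have hrow0 : (aFillRight (W - 1) (pvG σ W 0 0) stA.2.1).1 = pvT σ W 0 := by
    rw [← hTlen 0]
    exact aFillRight_spec (pvT σ W 0) _ _ hT0chain hT0bk hT0pw
  -- A: the remaining rows
  have hRSchain : List.Chain (fun r r' => List.Forall₂ (fun a p => pvTK p = pvBK a) r r')
      (pvF σ W 0) (pvRS σ W H) := by
    have hc := pvChainRange (fun r r' => List.Forall₂ (fun a p => pvTK p = pvBK a) r r')
      (pvF σ W) (H - 1) 0 ?_
    · simpa [pvRS] using hc
    · intro y hy0 hy1
      refine List.Forall₂.cons (hver y (List.mem_range.2 (by omega)) 0 (List.mem_range.2 (by omega))) ?_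
      exact pvForall2Range _ (W - 1) _ _ (fun i hi =>
        hver y (List.mem_range.2 (by omega)) (i + 1) (List.mem_range.2 (by omega)))
  have hRSbk : ∀ p ∈ (pvRS σ W H).flatten, stA.2.2.get? (pvTK p) = some [p] := by
    intro p hp
    obtain ⟨r, hr, hpr⟩ := List.mem_flatten.1 hp
    obtain ⟨j, hj, rfl⟩ := hRSmem r hr
    rcases hFmem (j + 1) p hpr with rfl | ⟨i, hi, rfl⟩
    · exact htdA (j + 1) 0 (by omega) hj (by omega)
    · exact htdA (j + 1) (i + 1) (by omega) hj hi
  have hFpwT : ∀ y, 1 ≤ y → y < H → List.Pairwise (fun a b => pvTK a ≠ pvTK b) (pvF σ W y) := by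
    intro y hy1 hy
    have hsp : pvF σ W y = (List.range W).map (fun x => pvG σ W y x) := by
      rw [pvRangeSplit (fun x => pvG σ W y x) W hW]; rfl
    rw [hsp]
    exact pvPairwiseRange _ _ _ (fun i j hij hj =>
      hkT y i y j hy1 hy (by omega) hy1 hy hj (by omega))
  have hRSpw : List.Pairwise (fun a b => pvTK a ≠ pvTK b) (pvRS σ W H).flatten := by
    rw [List.pairwise_flatten]
    constructor
    · intro r hr
      obtain ⟨j, hj, rfl⟩ := hRSmem r hr
      exact hFpwT (j + 1) (by omega) hj
    · refine pvPairwiseRange _ _ _ (fun i j hij hj a ha b hb => ?_)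
      rcases hFmem (i + 1) a ha with rfl | ⟨ia, hia, rfl⟩ <;>
        rcases hFmem (j + 1) b hb with rfl | ⟨ib, hib, rfl⟩
      · exact hkT (i + 1) 0 (j + 1) 0 (by omega) (by omega) (by omega) (by omega) (by omega) (by omega) (by omega)
      · exact hkT (i + 1) 0 (j + 1) (ib + 1) (by omega) (by omega) (by omega) (by omega) (by omega) hib (by omega)
      · exact hkT (i + 1) (ia + 1) (j + 1) 0 (by omega) (by omega) hia (by omega) (by omega) (by omega) (by omega)
      · exact hkT (i + 1) (ia + 1) (j + 1) (ib + 1) (by omega) (by omega) hia (by omega) (by omega) hib (by omega)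
  have hRSlen : (pvRS σ W H).length = H - 1 := by simp [pvRS]
  have hrows : aFillRows (H - 1) (pvF σ W 0) stA.2.2 = pvRS σ W H := by
    rw [← hRSlen]
    exact aFillRows_spec (pvRS σ W H) _ _ hRSchain hRSbk hRSpw
  -- A's value
  have hA : puzzle_solver pieces width height =
      (pvF σ W 0 :: pvRS σ W H).map (fun r => r.map (fun p => p.2.2)) := by
    simp only [puzzle_solver]
    rw [← hstA, hcornerA]
    simp only [Option.getD_some]
    rw [if_neg (by omega), if_neg (by omega)]
    rw [← hWdef, ← hHdef, hrow0]
    rw [show pvG σ W 0 0 :: pvT σ W 0 = pvF σ W 0 from rfl]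
    rw [hrows]
  -- B's side
  have hb : ∀ p ∈ pieces, bTL p = pvTL p ∧ bTR p = pvTR p ∧ bBL p = pvBL p ∧ bBR p = pvBR p ∧
      bCorner p = pvCorner p := fun p hp => pvAcc p (hlen2 p hp).1 (hlen2 p hp).2
  set sB := pieces.foldl bSplitStep (none, []) with hsB
  have hcornerB : sB.1 = some (pvG σ W 0 0) := by
    rw [hsB, bSplit_fst]
    rw [List.filter_congr (fun p hp => (hb p hp).2.2.2.2), hfilterA]
    rfl
  have hrest : sB.2 = pieces.filter (fun p => !pvCorner p) := by
    rw [hsB, bSplit_snd, List.nil_append]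
    exact List.filter_congr (fun p hp => by rw [(hb p hp).2.2.2.2])
  set ddB := sB.2.foldl bDictStep (PySem.Dict.empty, PySem.Dict.empty) with hddB
  have hrestFL : ∀ (k : PvK) (c : PvP),
      pieces.filter (fun q => !pvCorner q && (pvLK q == k)) = [c] →
      sB.2.filter (fun p => (bTL p, bBL p) == k) = [c] := by
    intro k c hf
    rw [hrest, List.filter_filter]
    rw [← hf]
    refine List.filter_congr (fun p hp => ?_)
    have hbp := hb p hp
    rw [show (bTL p, bBL p) = pvLK p from by rw [pvLK, hbp.1, hbp.2.2.1]]
    exact Bool.and_comm _ _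
  have hrestFT : ∀ (k : PvK) (c : PvP),
      pieces.filter (fun q => !pvCorner q && (pvTK q == k)) = [c] →
      sB.2.filter (fun p => (bTL p, bTR p) == k) = [c] := by
    intro k c hf
    rw [hrest, List.filter_filter]
    rw [← hf]
    refine List.filter_congr (fun p hp => ?_)
    have hbp := hb p hp
    rw [show (bTL p, bTR p) = pvTK p from by rw [pvTK, hbp.1, hbp.2.1]]
    exact Bool.and_comm _ _
  have hldB : ∀ y x, y < H → 1 ≤ x → x < W →
      ddB.1.get? (pvLK (pvG σ W y x)) = some [pvG σ W y x] := by
    intro y x hy hx1 hx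
    rw [hddB]
    exact bFold_ld_single sB.2 _ _ _ (hrestFL _ _ (hbLfilter y x hy hx1 hx)) (PySem.Dict.get?_empty _)
  have htdB : ∀ y x, 1 ≤ y → y < H → x < W →
      ddB.2.get? (pvTK (pvG σ W y x)) = some [pvG σ W y x] := by
    intro y x hy1 hy hx
    rw [hddB]
    exact bFold_td_single sB.2 _ _ _ (hrestFT _ _ (hbTfilter y x hy1 hy hx)) (PySem.Dict.get?_empty _)
  -- b-keyed facts about the tiling cells
  have hbG : ∀ y x, y < H → x < W → bTL (pvG σ W y x) = pvTL (pvG σ W y x) ∧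
      bTR (pvG σ W y x) = pvTR (pvG σ W y x) ∧ bBL (pvG σ W y x) = pvBL (pvG σ W y x) ∧
      bBR (pvG σ W y x) = pvBR (pvG σ W y x) := by
    intro y x hy hx
    have := hb _ (hGmem y x hy hx)
    exact ⟨this.1, this.2.1, this.2.2.1, this.2.2.2.1⟩
  have hbLKey : ∀ y x, y < H → x < W → (bTL (pvG σ W y x), bBL (pvG σ W y x)) = pvLK (pvG σ W y x) := by
    intro y x hy hx
    obtain ⟨h1, _, h3, _⟩ := hbG y x hy hx
    rw [pvLK, h1, h3]
  have hbTKey : ∀ y x, y < H → x < W → (bTL (pvG σ W y x), bTR (pvG σ W y x)) = pvTK (pvG σ W y x) := by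
    intro y x hy hx
    obtain ⟨h1, h2, _, _⟩ := hbG y x hy hx
    rw [pvTK, h1, h2]
  have hbRKey : ∀ y x, y < H → x < W → (bTR (pvG σ W y x), bBR (pvG σ W y x)) = pvRK (pvG σ W y x) := by
    intro y x hy hx
    obtain ⟨_, h2, _, h4⟩ := hbG y x hy hx
    rw [pvRK, h2, h4]
  have hbBKey : ∀ y x, y < H → x < W → (bBL (pvG σ W y x), bBR (pvG σ W y x)) = pvBK (pvG σ W y x) := by
    intro y x hy hx
    obtain ⟨_, _, h3, h4⟩ := hbG y x hy hx
    rw [pvBK, h3, h4]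
  -- B: per-row left-to-right chains, b-keyed
  have hTchainB : ∀ y, y < H → List.Chain (fun a b => (bTL b, bBL b) = (bTR a, bBR a))
      (pvG σ W y 0) (pvT σ W y) := by
    intro y hy
    have hc := pvChainRange (fun a b => (bTL b, bBL b) = (bTR a, bBR a)) (fun x => pvG σ W y x)
      (W - 1) 0 ?_
    · simpa [pvT] using hc
    · intro i hi0 hi1
      rw [hbLKey y (i + 1) hy (by omega), hbRKey y i hy (by omega)]
      exact hhor y (List.mem_range.2 hy) i (List.mem_range.2 (by omega))
  have hTbkB : ∀ y, y < H → ∀ p ∈ pvT σ W y, ddB.1.get? (bTL p, bBL p) = some [p] := by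
    intro y hy p hp
    obtain ⟨i, hi, rfl⟩ := hTmem y p hp
    rw [hbLKey y (i + 1) hy hi]
    exact hldB y (i + 1) hy (by omega) hi
  have hTpwB : ∀ y, y < H → List.Pairwise (fun a b => (bTL a, bBL a) ≠ (bTL b, bBL b)) (pvT σ W y) := by
    intro y hy
    refine pvPairwiseRange _ _ _ (fun i j hij hj => ?_)
    rw [hbLKey y (i + 1) hy (by omega), hbLKey y (j + 1) hy (by omega)]
    exact hkL y (i + 1) y (j + 1) hy (by omega) (by omega) hy (by omega) (by omega) (by omega)
  -- B's value
  have hB : puzzle_solver_alt pieces width height =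
      (pvF σ W 0 :: pvRS σ W H).map (fun r => r.map (fun p => p.2.2)) := by
    simp only [puzzle_solver_alt]
    rw [← hsB, hcornerB]
    simp only [Option.getD_some]
    rw [← hddB, ← hWdef, ← hHdef]
    have hstep := bGridGo_unfold H W hH hW (pvG σ W 0 0) ddB.1 ddB.2
    rw [hstep]
    have hrowB := bRowTail_spec (pvT σ W 0) (pvG σ W 0 0) ddB.1 (hTchainB 0 hH) (hTbkB 0 hH) (hTpwB 0 hH)
    have hrowB1 : (bRowTail (W - 1) (pvG σ W 0 0) ddB.1).1 = pvT σ W 0 := by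
      rw [← hTlen 0]; exact hrowB.1
    have hrowBpres : ∀ k, (∀ p ∈ pvT σ W 0, (bTL p, bBL p) ≠ k) →
        (bRowTail (W - 1) (pvG σ W 0 0) ddB.1).2.get? k = ddB.1.get? k := by
      rw [← hTlen 0]; exact hrowB.2
    rw [hrowB1]
    rw [show pvG σ W 0 0 :: pvT σ W 0 = pvF σ W 0 from rfl]
    have htails : (pvRS σ W H).map List.tail = (List.range (H - 1)).map (fun j => pvT σ W (j + 1)) := by
      simp only [pvRS, List.map_map]
      rfl
    have hgo : bGridGo (H - 1) (some (pvF σ W 0)) (pvG σ W 0 0) W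
        (bRowTail (W - 1) (pvG σ W 0 0) ddB.1).2 ddB.2 = pvRS σ W H := by
      rw [show H - 1 = (pvRS σ W H).length from hRSlen.symm]
      refine bGridGo_spec' (pvRS σ W H) (pvF σ W 0) W hW _ _ (pvG σ W 0 0) ?shape ?hch ?htbk ?htpw ?hlch ?hlbk ?hlpw
      case shape =>
        intro r hr
        obtain ⟨j, hj, rfl⟩ := hRSmem r hr
        exact ⟨hTlen (j + 1), by simp [pvF]⟩
      case hch =>
        have hc := pvChainRange (fun r r' => (bTL (r'.headD pvDummy), bTR (r'.headD pvDummy)) =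
          (bBL (r.headD pvDummy), bBR (r.headD pvDummy))) (pvF σ W) (H - 1) 0 ?_
        · simpa [pvRS] using hc
        · intro i hi0 hi1
          show (bTL (pvG σ W (i + 1) 0), bTR (pvG σ W (i + 1) 0)) =
            (bBL (pvG σ W i 0), bBR (pvG σ W i 0))
          rw [hbTKey (i + 1) 0 (by omega) (by omega), hbBKey i 0 (by omega) (by omega)]
          exact hver i (List.mem_range.2 (by omega)) 0 (List.mem_range.2 (by omega))
      case htbk =>
        intro r hr
        obtain ⟨j, hj, rfl⟩ := hRSmem r hr
        show ddB.2.get? (bTL (pvG σ W (j + 1) 0), bTR (pvG σ W (j + 1) 0)) = some [pvG σ W (j + 1) 0]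
        rw [hbTKey (j + 1) 0 (by omega) (by omega)]
        exact htdB (j + 1) 0 (by omega) hj (by omega)
      case htpw =>
        refine pvPairwiseRange _ _ _ (fun i j hij hj => ?_)
        show (bTL (pvG σ W (i + 1) 0), bTR (pvG σ W (i + 1) 0)) ≠
          (bTL (pvG σ W (j + 1) 0), bTR (pvG σ W (j + 1) 0))
        rw [hbTKey (i + 1) 0 (by omega) (by omega), hbTKey (j + 1) 0 (by omega) (by omega)]
        exact hkT (i + 1) 0 (j + 1) 0 (by omega) (by omega) (by omega) (by omega) (by omega) (by omega) (by omega)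
      case hlch =>
        intro r hr
        obtain ⟨j, hj, rfl⟩ := hRSmem r hr
        exact hTchainB (j + 1) hj
      case hlbk =>
        intro p hp
        rw [htails] at hp
        obtain ⟨t, ht, hpt⟩ := List.mem_flatten.1 hp
        obtain ⟨j, hjr, rfl⟩ := List.mem_map.1 ht
        have hj : j < H - 1 := List.mem_range.1 hjr
        obtain ⟨i, hi, rfl⟩ := hTmem (j + 1) p hpt
        rw [hrowBpres _ ?away]
        · rw [hbLKey (j + 1) (i + 1) (by omega) hi]
          exact hldB (j + 1) (i + 1) (by omega) (by omega) hi
        case away =>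
          intro q hq
          obtain ⟨iq, hiq, rfl⟩ := hTmem 0 q hq
          rw [hbLKey 0 (iq + 1) (by omega) hiq, hbLKey (j + 1) (i + 1) (by omega) hi]
          exact hkL 0 (iq + 1) (j + 1) (i + 1) (by omega) (by omega) hiq (by omega) (by omega) hi (by omega)
      case hlpw =>
        rw [htails, List.pairwise_flatten]
        constructor
        · intro t ht
          obtain ⟨j, hjr, rfl⟩ := List.mem_map.1 ht
          exact hTpwB (j + 1) (by have := List.mem_range.1 hjr; omega)
        · refine pvPairwiseRange _ _ _ (fun i j hij hj a ha b hb => ?_)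
          obtain ⟨ia, hia, rfl⟩ := hTmem (i + 1) a ha
          obtain ⟨ib, hib, rfl⟩ := hTmem (j + 1) b hb
          rw [hbLKey (i + 1) (ia + 1) (by omega) hia, hbLKey (j + 1) (ib + 1) (by omega) hib]
          exact hkL (i + 1) (ia + 1) (j + 1) (ib + 1) (by omega) (by omega) hia (by omega) (by omega) hib (by omega)
    rw [hgo]
  rw [hA, hB]

-- ===== VERDICT (by name: the statement is the Claim_ definition above) =====
theorem puzzle_solver_spec : Claim_equal_puzzle_solver := by
  intro pieces width height _hdom hpre
  unfold Spec_puzzle_solver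
  obtain ⟨hlen2, hcase⟩ := hpre
  rcases hcase with ⟨hw, hh, hlen, σ, hσmem, hgood⟩ | ⟨hdims, hnocorner⟩ | ⟨hw1, hh1, c, hcmem, hc⟩
  · exact pvMainCase pieces width height hlen2 hw hh hlen σ hσmem hgood
  · -- empty grids: A returns a grid of empty rows, so does B's y/x loop
    rcases hdims with ⟨hh0, hw0⟩ | ⟨hw0, hh1⟩
    · have h0 : height.toNat = 0 := by omega
      simp only [puzzle_solver, puzzle_solver_alt, h0]
      rfl
    · have h0 : width.toNat = 0 := by omega
      have hHn : ¬height.toNat = 0 := by omega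
      simp only [puzzle_solver, puzzle_solver_alt, h0]
      rw [if_neg hHn]
      simp only [if_true]
      rw [bGridGo_zeroW]
      simp [List.map_replicate, List.map_const']
  · -- 1×1 grid: both sides emit the last corner piece
    have hW1 : width.toNat = 1 := by omega
    have hH1 : height.toNat = 1 := by omega
    have hne : pieces.filter pvCorner ≠ [] :=
      List.ne_nil_of_mem (List.mem_filter.2 ⟨hcmem, hc⟩)
    obtain ⟨u, hu⟩ := Option.isSome_iff_exists.1 (List.getLast?_isSome.2 hne)
    simp only [puzzle_solver, puzzle_solver_alt, hW1, hH1]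
    rw [aFold_fst, bSplit_fst,
      List.filter_congr (fun p hp => ((pvAcc p (hlen2 p hp).1 (hlen2 p hp).2).2.2.2.2 : bCorner p = pvCorner p)),
      hu]
    rfl
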